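-- pv_equiv track=rewrite | github.com/khanhdk0000/coding-interview | leetcode/array/countMatchingSubarrays.py | countMatchingSubarrays_kmp
-- ===== SOURCE A (Python) =====
-- from typing import List
--
-- def countMatchingSubarrays_kmp(nums: List[int], pattern: List[int]) -> int:
--     n, m = len(nums), len(pattern)
--
--     def trend(a, b):
--         return 1 if b > a else (-1 if b < a else 0)
--
--     # Build trend array from nums (length n-1)
--     t = [trend(nums[k], nums[k + 1]) for k in range(n - 1)]
--
--     # Build KMP failure (LPS) table for pattern
--     lps = [0] * m
--     length, i = 0, 1
--     while i < m:
--         if pattern[i] == pattern[length]: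
--             length += 1
--             lps[i] = length
--             i += 1
--         elif length:
--             length = lps[length - 1]
--         else:
--             lps[i] = 0
--             i += 1
--
--     # KMP search: find pattern in t
--     res = 0
--     j = 0  # pointer in pattern
--     for i in range(len(t)):
--         while j > 0 and t[i] != pattern[j]:
--             j = lps[j - 1]
--         if t[i] == pattern[j]:
--             j += 1
--         if j == m:
--             res += 1
--             j = lps[j - 1]
--     return res
-- ===== SOURCE B (Python) =====
-- def countMatchingSubarrays_kmp(nums, pattern):
--     # naive matching on the trend array instead of KMP
--     t = [(b > a) - (b < a) for a, b in zip(nums, nums[1:])]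
--     m = len(pattern)
--     return sum(1 for i in range(len(t) - m + 1) if t[i:i + m] == pattern)
-- ===== Notes on version B (the rewrite author's own statement) =====
-- stated objective: simpler
-- what changed: Replaces the KMP failure-table build and automaton search with a direct slice comparison at every start position of the trend array (naive substring counting); the C-level slice/list comparison beats the interpreted per-character KMP loop.
-- outside the precondition, e.g. on countMatchingSubarrays_kmp([], []): A returns 0, B returns 1; on countMatchingSubarrays_kmp([5], []): A returns 0, B returns 1
import Mathlib
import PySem

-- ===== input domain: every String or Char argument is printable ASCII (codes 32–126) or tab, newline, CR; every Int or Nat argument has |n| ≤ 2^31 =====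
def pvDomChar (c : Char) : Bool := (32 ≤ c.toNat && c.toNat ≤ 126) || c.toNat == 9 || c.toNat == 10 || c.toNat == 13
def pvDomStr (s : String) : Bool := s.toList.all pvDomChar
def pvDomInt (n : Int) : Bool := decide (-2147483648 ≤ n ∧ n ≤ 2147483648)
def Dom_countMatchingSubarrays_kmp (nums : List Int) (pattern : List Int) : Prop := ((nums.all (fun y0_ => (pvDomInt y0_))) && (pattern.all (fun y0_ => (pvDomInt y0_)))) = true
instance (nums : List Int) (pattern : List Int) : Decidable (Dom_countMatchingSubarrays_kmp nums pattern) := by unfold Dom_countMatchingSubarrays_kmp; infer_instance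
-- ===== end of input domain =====

-- B replaces A's KMP failure-table + automaton search with a direct slice comparison at
-- every start position of the trend array (simpler naive counting, same exact counts).

-- ===== PORT A =====
-- trend(a, b)
def pvTrend (a b : Int) : Int := if b > a then 1 else if b < a then -1 else 0

-- t = [trend(nums[k], nums[k+1]) for k in range(n - 1)]
def pvBuildT (nums : List Int) : List Int :=
  (PySem.List.pyRange 0 ((nums.length : Int) - 1) 1).map
    (fun k => pvTrend (PySem.List.pyGetD nums k 0) (PySem.List.pyGetD nums (k + 1) 0))

-- the LPS while-loop; fuel only makes the recursion structural (2*m+1 is enough, proved below)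
def pvLpsLoop (pattern : List Int) (m : Nat) : Nat → List Nat → Nat → Nat → List Nat
  | 0, lps, _, _ => lps
  | fuel + 1, lps, length, i =>
    if i < m then
      if PySem.List.pyGetD pattern (i : Int) 0 = PySem.List.pyGetD pattern (length : Int) 0 then
        pvLpsLoop pattern m fuel (lps.set i (length + 1)) (length + 1) (i + 1)
      else if length ≠ 0 then
        pvLpsLoop pattern m fuel lps (lps.getD (length - 1) 0) i
      else
        pvLpsLoop pattern m fuel (lps.set i 0) 0 (i + 1)
    else lps

def pvLps (pattern : List Int) : List Nat :=
  pvLpsLoop pattern pattern.length (2 * pattern.length + 1) (List.replicate pattern.length 0) 0 1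

-- the inner 'while j > 0 and t[i] != pattern[j]'; fuel j+1 is enough (j strictly decreases)
def pvDescend (c : Int) (pattern : List Int) (lps : List Nat) : Nat → Nat → Nat
  | 0, j => j
  | fuel + 1, j =>
    if 0 < j ∧ c ≠ PySem.List.pyGetD pattern (j : Int) 0 then
      pvDescend c pattern lps fuel (lps.getD (j - 1) 0)
    else j

-- one iteration of the 'for i in range(len(t))' search loop, state (res, j)
def pvStep (pattern : List Int) (lps : List Nat) (m : Nat) (st : Int × Nat) (c : Int) : Int × Nat :=
  let j0 := pvDescend c pattern lps (st.2 + 1) st.2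
  let j1 := if c = PySem.List.pyGetD pattern (j0 : Int) 0 then j0 + 1 else j0
  if j1 = m then (st.1 + 1, lps.getD (m - 1) 0) else (st.1, j1)

def countMatchingSubarrays_kmp (nums : List Int) (pattern : List Int) : Int :=
  let m := pattern.length
  let t := pvBuildT nums
  let lps := pvLps pattern
  ((t.foldl (pvStep pattern lps m) (0, 0))).1

-- ===== PORT B =====
-- t = [(b > a) - (b < a) for a, b in zip(nums, nums[1:])]
def pvBuildT_alt (nums : List Int) : List Int :=
  (nums.zip (PySem.List.slice nums (some 1) none)).map
    (fun p => (if p.2 > p.1 then (1 : Int) else 0) - (if p.2 < p.1 then 1 else 0))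

-- sum(1 for i in range(len(t) - m + 1) if t[i:i+m] == pattern)
def countMatchingSubarrays_kmp_alt (nums : List Int) (pattern : List Int) : Int :=
  let t := pvBuildT_alt nums
  let m := pattern.length
  ((PySem.List.pyRange 0 ((t.length : Int) - (m : Int) + 1) 1).map
    (fun i => if PySem.List.slice t (some i) (some (i + (m : Int))) = pattern then (1 : Int) else 0)).sum

-- ===== PRECONDITION & SPEC =====
-- Pre_ excludes the empty pattern: there A raises IndexError (it reads pattern[0]) whenever the
-- trend array is nonempty, and on the remaining degenerate inputs (nums of length ≤ 1) the number
-- of matches of an empty pattern is a corner nobody would specify (A returns 0, B returns 1).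
def Pre_countMatchingSubarrays_kmp (nums : List Int) (pattern : List Int) : Prop := pattern ≠ []
instance (nums : List Int) (pattern : List Int) : Decidable (Pre_countMatchingSubarrays_kmp nums pattern) := by unfold Pre_countMatchingSubarrays_kmp; infer_instance

def pvWitness_countMatchingSubarrays_kmp : List Int × List Int := ([1, 2, 4, 4, 1, 3, 5, 5, 3], [1, 0, -1])

def Spec_countMatchingSubarrays_kmp (nums : List Int) (pattern : List Int) (out : Int) : Prop := out = countMatchingSubarrays_kmp_alt nums pattern
instance (nums : List Int) (pattern : List Int) (out : Int) : Decidable (Spec_countMatchingSubarrays_kmp nums pattern out) := by unfold Spec_countMatchingSubarrays_kmp; infer_instance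

-- ===== CLAIM (what is proved, stated in full; the proofs are below) =====
def Claim_equal_countMatchingSubarrays_kmp : Prop := ∀ (nums : List Int) (pattern : List Int), Dom_countMatchingSubarrays_kmp nums pattern → Pre_countMatchingSubarrays_kmp nums pattern → Spec_countMatchingSubarrays_kmp nums pattern (countMatchingSubarrays_kmp nums pattern)

-- ===== LEMMAS AND PROOFS =====

-- longest proper border of the length-k prefix of P
def pvMB (P : List Int) (k : Nat) : Nat :=
  Nat.findGreatest (fun ℓ => ℓ < k ∧ P.take ℓ <:+ P.take k) k

-- longest ℓ ≤ |P| with P.take ℓ a suffix of u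
def pvMu (P u : List Int) : Nat := Nat.findGreatest (fun ℓ => P.take ℓ <:+ u) P.length

-- longest ℓ < |P| with P.take ℓ a suffix of u (the KMP automaton state)
def pvNu (P u : List Int) : Nat :=
  Nat.findGreatest (fun ℓ => ℓ < P.length ∧ P.take ℓ <:+ u) P.length

-- match count as a sum over end positions
def pvCnt (P t : List Int) : Int :=
  ((List.range t.length).map (fun i => if P <:+ t.take (i + 1) then (1 : Int) else 0)).sum

theorem suf_of_suf_le {a b c : List Int} (ha : a <:+ c) (hb : b <:+ c)
    (h : a.length ≤ b.length) : a <:+ b := by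
  rw [← List.reverse_prefix] at ha hb ⊢
  exact List.prefix_of_prefix_length_le ha hb (by simpa using h)

theorem mb_border (P : List Int) (k : Nat) (hk : 1 ≤ k) :
    pvMB P k < k ∧ P.take (pvMB P k) <:+ P.take k := by
  unfold pvMB
  exact Nat.findGreatest_spec (P := fun ℓ => ℓ < k ∧ P.take ℓ <:+ P.take k)
    (Nat.zero_le k) ⟨hk, by simp⟩

theorem mb_ge {P : List Int} {k ℓ : Nat} (h1 : ℓ < k) (h2 : P.take ℓ <:+ P.take k) :
    ℓ ≤ pvMB P k :=
  Nat.le_findGreatest h1.le ⟨h1, h2⟩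

theorem mu_le (P u : List Int) : pvMu P u ≤ P.length := Nat.findGreatest_le _

theorem mu_suffix (P u : List Int) : P.take (pvMu P u) <:+ u := by
  unfold pvMu
  exact Nat.findGreatest_spec (P := fun ℓ => P.take ℓ <:+ u) (Nat.zero_le _) (by simp)

theorem mu_ge (P u : List Int) {ℓ : Nat} (h1 : ℓ ≤ P.length) (h2 : P.take ℓ <:+ u) :
    ℓ ≤ pvMu P u :=
  Nat.le_findGreatest h1 h2

theorem nu_spec (P u : List Int) (hP : P ≠ []) :
    pvNu P u < P.length ∧ P.take (pvNu P u) <:+ u := by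
  unfold pvNu
  exact Nat.findGreatest_spec (P := fun ℓ => ℓ < P.length ∧ P.take ℓ <:+ u)
    (Nat.zero_le _) ⟨List.length_pos_iff.mpr hP, by simp⟩

theorem nu_ge (P u : List Int) {ℓ : Nat} (h1 : ℓ < P.length) (h2 : P.take ℓ <:+ u) :
    ℓ ≤ pvNu P u :=
  Nat.le_findGreatest h1.le ⟨h1, h2⟩

theorem take_length_eq (P : List Int) {ℓ : Nat} (h : ℓ ≤ P.length) :
    (P.take ℓ).length = ℓ := by simp [List.length_take, Nat.min_eq_left h]

theorem nu_nil (P : List Int) : pvNu P [] = 0 := by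
  by_cases hP : P = []
  · subst hP; unfold pvNu; simp
  · obtain ⟨hlt, hsuf⟩ := nu_spec P [] hP
    have h := congrArg List.length (List.suffix_nil.mp hsuf)
    rw [take_length_eq P hlt.le] at h
    simpa using h

theorem snoc_suffix_snoc {X u : List Int} {d c : Int} :
    X ++ [d] <:+ u ++ [c] ↔ d = c ∧ X <:+ u := by
  constructor
  · rintro ⟨w, hw⟩
    rw [← List.append_assoc] at hw
    obtain ⟨h1, h2⟩ := List.append_inj' hw (by simp)
    exact ⟨by simpa using h2, ⟨w, h1⟩⟩
  · rintro ⟨rfl, w, hw⟩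
    exact ⟨w, by rw [← List.append_assoc, hw]⟩

theorem take_snoc (P : List Int) {s : Nat} (hs : s < P.length) :
    P.take (s + 1) = P.take s ++ [P[s]] := by
  rw [List.take_add_one, List.getElem?_eq_getElem hs]
  rfl

theorem suffix_snoc_iff (P : List Int) {ℓ : Nat} (h1 : 1 ≤ ℓ) (h2 : ℓ ≤ P.length)
    (u : List Int) (c : Int) :
    P.take ℓ <:+ u ++ [c] ↔ P.take (ℓ - 1) <:+ u ∧ P[ℓ - 1]? = some c := by
  obtain ⟨s, rfl⟩ : ∃ s, ℓ = s + 1 := ⟨ℓ - 1, by omega⟩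
  have hs : s < P.length := by omega
  simp only [Nat.add_sub_cancel]
  rw [take_snoc P hs, snoc_suffix_snoc, List.getElem?_eq_getElem hs]
  simp only [Option.some.injEq]
  tauto

theorem lpsLoop_correct (P : List Int) :
    ∀ (fuel : Nat) (lps : List Nat) (length i : Nat),
    lps.length = P.length → 1 ≤ i → i ≤ P.length → length < i →
    (∀ k, 1 ≤ k → k ≤ i → lps.getD (k - 1) 0 = pvMB P k) →
    P.take length <:+ P.take i →
    (∀ ℓ, ℓ < i → P.take ℓ <:+ P.take i → P[ℓ]? = P[i]? → ℓ ≤ length) →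
    2 * (P.length - i) + length < fuel →
    ∀ k, 1 ≤ k → k ≤ P.length →
      (pvLpsLoop P P.length fuel lps length i).getD (k - 1) 0 = pvMB P k := by
  intro fuel
  induction fuel with
  | zero => intro lps length i _ _ _ _ _ _ _ hfuel; omega
  | succ fuel ih =>
    intro lps length i hlen hi1 him hli hcorr hsuf hmax hfuel k hk1 hkm
    rw [pvLpsLoop]
    by_cases hilt : i < P.length
    · simp only [hilt, if_true]
      have hgi : PySem.List.pyGetD P (i : Int) 0 = P[i] := by
        rw [PySem.List.pyGetD_natCast, List.getD_eq_getElem P 0 hilt]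
      have hll : length < P.length := lt_trans hli hilt
      have hgl : PySem.List.pyGetD P (length : Int) 0 = P[length] := by
        rw [PySem.List.pyGetD_natCast, List.getD_eq_getElem P 0 hll]
      have htake : P.take (i + 1) = P.take i ++ [P[i]] := take_snoc P hilt
      by_cases hc : PySem.List.pyGetD P (i : Int) 0 = PySem.List.pyGetD P (length : Int) 0
      · -- extend: pattern[i] == pattern[length]
        simp only [hc, if_true]
        have hchar : P[length] = P[i] := by rw [← hgi, ← hgl, hc]
        have hmb : pvMB P (i + 1) = length + 1 := by
          have hle1 : length + 1 ≤ pvMB P (i + 1) := by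
            apply mb_ge (by omega)
            rw [htake, take_snoc P hll, hchar]
            exact snoc_suffix_snoc.mpr ⟨rfl, hsuf⟩
          have hle2 : pvMB P (i + 1) ≤ length + 1 := by
            obtain ⟨hblt, hbsuf⟩ := mb_border P (i + 1) (by omega)
            rcases Nat.eq_zero_or_pos (pvMB P (i + 1)) with h0 | hpos
            · omega
            · rw [htake, suffix_snoc_iff P hpos (by omega)] at hbsuf
              have := hmax _ (by omega) hbsuf.1
                (by rw [hbsuf.2, List.getElem?_eq_getElem hilt])
              omega
          omega
        refine ih (lps.set i (length + 1)) (length + 1) (i + 1)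
          (by simpa using hlen) (by omega) (by omega) (by omega) ?_ ?_ ?_ (by omega) k hk1 hkm
        · intro k' hk'1 hk'i
          by_cases hk'eq : k' = i + 1
          · subst hk'eq
            rw [List.getD_eq_getElem?_getD, Nat.add_sub_cancel,
              List.getElem?_set_self (by omega), hmb]
            rfl
          · rw [List.getD_eq_getElem?_getD, List.getElem?_set_ne (by omega),
              ← List.getD_eq_getElem?_getD]
            exact hcorr k' hk'1 (by omega)
        · rw [htake, take_snoc P hll, hchar]
          exact snoc_suffix_snoc.mpr ⟨rfl, hsuf⟩
        · intro ℓ hℓ hℓsuf _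
          have := mb_ge hℓ hℓsuf
          omega
      · simp only [hc, if_false]
        have hchar : P[i] ≠ P[length] := by rw [← hgi, ← hgl]; exact hc
        by_cases hl0 : length ≠ 0
        · -- descend: length = lps[length - 1]
          rw [if_pos hl0]
          have hlv : lps.getD (length - 1) 0 = pvMB P length :=
            hcorr length (by omega) (by omega)
          obtain ⟨hblt, hbsuf⟩ := mb_border P length (by omega)
          refine ih lps (lps.getD (length - 1) 0) i
            hlen hi1 him (by rw [hlv]; omega) hcorr ?_ ?_ (by rw [hlv]; omega) k hk1 hkm
          · rw [hlv]; exact hbsuf.trans hsuf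
          · intro ℓ hℓ hℓsuf hℓchar
            have hℓle : ℓ ≤ length := hmax ℓ hℓ hℓsuf hℓchar
            have hℓne : ℓ ≠ length := by
              intro rfl'
              subst rfl'
              rw [List.getElem?_eq_getElem hll, List.getElem?_eq_getElem hilt] at hℓchar
              exact hchar (by injection hℓchar with h; rw [h])
            have hsub : P.take ℓ <:+ P.take length :=
              suf_of_suf_le hℓsuf hsuf
                (by rw [take_length_eq P (by omega), take_length_eq P (by omega)]; omega)
            rw [hlv]
            exact mb_ge (by omega) hsub
        · -- length == 0, set lps[i] = 0
          rw [if_neg hl0]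
          have hl0' : length = 0 := by omega
          subst hl0'
          have hmb : pvMB P (i + 1) = 0 := by
            obtain ⟨hblt, hbsuf⟩ := mb_border P (i + 1) (by omega)
            rcases Nat.eq_zero_or_pos (pvMB P (i + 1)) with h0 | hpos
            · exact h0
            · exfalso
              rw [htake, suffix_snoc_iff P hpos (by omega)] at hbsuf
              have hle0 := hmax _ (by omega) hbsuf.1
                (by rw [hbsuf.2, List.getElem?_eq_getElem hilt])
              have hb1 : pvMB P (i + 1) = 1 := by omega
              rw [hb1] at hbsuf
              simp only [Nat.sub_self] at hbsuf
              have h00 := hbsuf.2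
              rw [List.getElem?_eq_getElem (by omega : 0 < P.length)] at h00
              exact hchar (by injection h00 with h; exact h.symm)
          refine ih (lps.set i 0) 0 (i + 1)
            (by simpa using hlen) (by omega) (by omega) (by omega) ?_ (by simp) ?_ (by omega) k hk1 hkm
          · intro k' hk'1 hk'i
            by_cases hk'eq : k' = i + 1
            · subst hk'eq
              rw [List.getD_eq_getElem?_getD, Nat.add_sub_cancel,
                List.getElem?_set_self (by omega), hmb]
              rfl
            · rw [List.getD_eq_getElem?_getD, List.getElem?_set_ne (by omega),
                ← List.getD_eq_getElem?_getD]
              exact hcorr k' hk'1 (by omega)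
          · intro ℓ hℓ hℓsuf _
            have := mb_ge hℓ hℓsuf
            omega
    · simp only [hilt, if_false]
      exact hcorr k hk1 (by omega)

theorem lps_correct (P : List Int) (hP : P ≠ []) (k : Nat) (h1 : 1 ≤ k) (h2 : k ≤ P.length) :
    (pvLps P).getD (k - 1) 0 = pvMB P k := by
  have hm : 1 ≤ P.length := List.length_pos_iff.mpr hP
  refine lpsLoop_correct P (2 * P.length + 1) (List.replicate P.length 0) 0 1
    (by simp) le_rfl hm (by omega) ?_ (by simp) ?_ (by omega) k h1 h2
  · intro k' hk'1 hk'2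
    have hk' : k' = 1 := by omega
    subst hk'
    have h0 : pvMB P 1 = 0 := by have := (mb_border P 1 le_rfl).1; omega
    rw [h0, List.getD_eq_getElem?_getD, List.getElem?_replicate]
    simp [show (0:Nat) < P.length from hm]
  · intro ℓ hℓ _ _
    omega

theorem descend_correct (P : List Int) (lps : List Nat)
    (hlps : ∀ k, 1 ≤ k → k ≤ P.length → lps.getD (k - 1) 0 = pvMB P k)
    (c : Int) (u : List Int) :
    ∀ (fuel j : Nat), j < fuel → j < P.length → P.take j <:+ u →
    (∀ ℓ, ℓ < P.length → P.take ℓ <:+ u → P[ℓ]? = some c → ℓ ≤ j) →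
    pvDescend c P lps fuel j < P.length ∧ P.take (pvDescend c P lps fuel j) <:+ u ∧
    (∀ ℓ, ℓ < P.length → P.take ℓ <:+ u → P[ℓ]? = some c → ℓ ≤ pvDescend c P lps fuel j) ∧
    (pvDescend c P lps fuel j = 0 ∨ P[pvDescend c P lps fuel j]? = some c) := by
  intro fuel
  induction fuel with
  | zero => intro j hj; omega
  | succ fuel ih =>
    intro j hjf hjm hsuf hmax
    rw [pvDescend]
    by_cases hcond : 0 < j ∧ c ≠ PySem.List.pyGetD P (j : Int) 0
    · rw [if_pos hcond]
      have hg : PySem.List.pyGetD P (j : Int) 0 = P[j] := by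
        rw [PySem.List.pyGetD_natCast, List.getD_eq_getElem P 0 hjm]
      have hlv : lps.getD (j - 1) 0 = pvMB P j := hlps j hcond.1 hjm.le
      obtain ⟨hblt, hbsuf⟩ := mb_border P j hcond.1
      refine ih (lps.getD (j - 1) 0) (by rw [hlv]; omega) (by rw [hlv]; omega)
        (by rw [hlv]; exact hbsuf.trans hsuf) ?_
      intro ℓ hℓ hℓsuf hℓchar
      have hℓle : ℓ ≤ j := hmax ℓ hℓ hℓsuf hℓchar
      have hℓne : ℓ ≠ j := by
        intro rfl'
        subst rfl'
        rw [List.getElem?_eq_getElem hjm] at hℓchar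
        exact hcond.2 (by rw [hg]; injection hℓchar with h; rw [h])
      have hsub : P.take ℓ <:+ P.take j :=
        suf_of_suf_le hℓsuf hsuf
          (by rw [take_length_eq P hℓ.le, take_length_eq P hjm.le]; omega)
      rw [hlv]
      exact mb_ge (by omega) hsub
    · rw [if_neg hcond]
      refine ⟨hjm, hsuf, hmax, ?_⟩
      rcases Nat.eq_zero_or_pos j with h0 | hpos
      · exact Or.inl h0
      · right
        have hcv : c = P[j] := by
          by_contra hne
          apply hcond
          refine ⟨hpos, ?_⟩
          rw [PySem.List.pyGetD_natCast, List.getD_eq_getElem P 0 hjm]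
          exact hne
        rw [List.getElem?_eq_getElem hjm, hcv]

theorem step_nu_finish (P : List Int) (hP : P ≠ []) (u : List Int) (c : Int) (res : Int)
    (j1 : Nat) (hj1 : j1 ≤ P.length) (hmu : pvMu P (u ++ [c]) = j1) :
    (if j1 = P.length then (res + 1, (pvLps P).getD (P.length - 1) 0) else (res, j1))
      = (res + (if P <:+ u ++ [c] then 1 else 0), pvNu P (u ++ [c])) := by
  have hm : 1 ≤ P.length := List.length_pos_iff.mpr hP
  by_cases hfull : j1 = P.length
  · simp only [hfull, if_true]
    have hPs : P <:+ u ++ [c] := by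
      have h := mu_suffix P (u ++ [c])
      rw [hmu, hfull, List.take_length] at h
      exact h
    obtain ⟨hblt, hbsuf⟩ := mb_border P P.length hm
    rw [List.take_length] at hbsuf
    have hnu : pvNu P (u ++ [c]) = pvMB P P.length := by
      have le1 : pvMB P P.length ≤ pvNu P (u ++ [c]) :=
        nu_ge P _ hblt (hbsuf.trans hPs)
      have le2 : pvNu P (u ++ [c]) ≤ pvMB P P.length := by
        obtain ⟨hnlt, hnsuf⟩ := nu_spec P (u ++ [c]) hP
        apply mb_ge hnlt
        rw [List.take_length]
        exact suf_of_suf_le hnsuf hPs (by rw [take_length_eq P hnlt.le]; exact hnlt.le)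
      omega
    rw [lps_correct P hP P.length hm le_rfl, hnu, if_pos hPs]
  · simp only [hfull, if_false]
    have hj1lt : j1 < P.length := by omega
    have hPns : ¬ P <:+ u ++ [c] := by
      intro h
      have := mu_ge P (u ++ [c]) le_rfl (by rw [List.take_length]; exact h)
      omega
    have hnu : pvNu P (u ++ [c]) = j1 := by
      have le1 : j1 ≤ pvNu P (u ++ [c]) := by
        apply nu_ge P _ hj1lt
        have h := mu_suffix P (u ++ [c])
        rw [hmu] at h
        exact h
      have le2 : pvNu P (u ++ [c]) ≤ j1 := by
        obtain ⟨hnlt, hnsuf⟩ := nu_spec P (u ++ [c]) hP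
        have := mu_ge P (u ++ [c]) hnlt.le hnsuf
        omega
      omega
    rw [hnu, if_neg hPns, add_zero]

theorem step_nu (P : List Int) (hP : P ≠ []) (u : List Int) (c : Int) (res : Int) :
    pvStep P (pvLps P) P.length (res, pvNu P u) c
      = (res + (if P <:+ u ++ [c] then 1 else 0), pvNu P (u ++ [c])) := by
  have hm : 1 ≤ P.length := List.length_pos_iff.mpr hP
  obtain ⟨hnlt, hnsuf⟩ := nu_spec P u hP
  obtain ⟨hr1, hr2, hr3, hr4⟩ :=
    descend_correct P (pvLps P) (fun k a b => lps_correct P hP k a b) c u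
      (pvNu P u + 1) (pvNu P u) (by omega) hnlt hnsuf
      (fun ℓ hℓ hs _ => nu_ge P u hℓ hs)
  unfold pvStep
  simp only
  set r := pvDescend c P (pvLps P) (pvNu P u + 1) (pvNu P u) with hrdef
  have hgr : PySem.List.pyGetD P (r : Int) 0 = P[r] := by
    rw [PySem.List.pyGetD_natCast, List.getD_eq_getElem P 0 hr1]
  by_cases hc : c = PySem.List.pyGetD P (r : Int) 0
  · -- extend match
    rw [if_pos hc]
    have hmu : pvMu P (u ++ [c]) = r + 1 := by
      have hle1 : r + 1 ≤ pvMu P (u ++ [c]) := by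
        apply mu_ge P _ (by omega)
        rw [suffix_snoc_iff P (by omega) (by omega), Nat.add_sub_cancel]
        have hcv : c = P[r] := by rw [hc, hgr]
        exact ⟨hr2, by rw [List.getElem?_eq_getElem hr1, hcv]⟩
      have hle2 : pvMu P (u ++ [c]) ≤ r + 1 := by
        rcases Nat.eq_zero_or_pos (pvMu P (u ++ [c])) with h0 | hpos
        · omega
        · have hsuf2 := mu_suffix P (u ++ [c])
          rw [suffix_snoc_iff P hpos (mu_le P _)] at hsuf2
          have hlt : pvMu P (u ++ [c]) - 1 < P.length := by
            have := mu_le P (u ++ [c]); omega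
          have := hr3 _ hlt hsuf2.1 hsuf2.2
          omega
      omega
    exact step_nu_finish P hP u c res (r + 1) hr1 hmu
  · -- no extension: r must be 0 and c ≠ P[0]
    rw [if_neg hc]
    have hr0 : r = 0 := by
      rcases hr4 with h0 | hchar
      · exact h0
      · exfalso
        rw [List.getElem?_eq_getElem hr1] at hchar
        exact hc (by rw [hgr]; injection hchar with h; rw [h])
    have hmu : pvMu P (u ++ [c]) = 0 := by
      rcases Nat.eq_zero_or_pos (pvMu P (u ++ [c])) with h0 | hpos
      · exact h0
      · exfalso
        have hsuf2 := mu_suffix P (u ++ [c])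
        rw [suffix_snoc_iff P hpos (mu_le P _)] at hsuf2
        have hle := hr3 _ (by have := mu_le P (u ++ [c]); omega) hsuf2.1 hsuf2.2
        rw [hr0] at hle
        have h1 : pvMu P (u ++ [c]) = 1 := by omega
        rw [h1] at hsuf2
        simp only [Nat.sub_self] at hsuf2
        rw [List.getElem?_eq_getElem (by omega : 0 < P.length)] at hsuf2
        apply hc
        rw [hgr]
        have hq : P[r]? = some c := by
          rw [hr0, List.getElem?_eq_getElem (by omega : 0 < P.length)]
          exact hsuf2.2
        rw [List.getElem?_eq_getElem hr1] at hq
        injection hq with h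
        exact h.symm
    rw [hr0]
    exact step_nu_finish P hP u c res 0 (by omega) hmu

theorem suffix_term_zero (P s : List Int) (h : s.length < P.length) :
    (if P <:+ s then (1 : Int) else 0) = 0 := by
  rw [if_neg]
  intro hs
  have := hs.length_le
  omega

theorem cnt_nil (P : List Int) : pvCnt P [] = 0 := by simp [pvCnt]

theorem cnt_snoc (P u : List Int) (c : Int) :
    pvCnt P (u ++ [c]) = pvCnt P u + (if P <:+ u ++ [c] then 1 else 0) := by
  unfold pvCnt
  have hlen : (u ++ [c]).length = u.length + 1 := by simp
  rw [hlen, List.range_succ, List.map_append, List.sum_append]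
  congr 2
  · apply List.map_congr_left
    intro i hi
    rw [List.mem_range] at hi
    rw [List.take_append_of_le_length (by omega)]
  · rw [List.map_singleton, List.sum_singleton,
      List.take_of_length_le (by simp)]

theorem fold_general (P : List Int) (hP : P ≠ []) :
    ∀ (v u : List Int),
      v.foldl (pvStep P (pvLps P) P.length) (pvCnt P u, pvNu P u)
        = (pvCnt P (u ++ v), pvNu P (u ++ v)) := by
  intro v
  induction v with
  | nil => intro u; simp
  | cons c v ih =>
    intro u
    rw [List.foldl_cons, step_nu P hP u c (pvCnt P u), ← cnt_snoc P u c,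
      ih (u ++ [c])]
    simp

theorem fold_eq_cnt (P : List Int) (hP : P ≠ []) (t : List Int) :
    (t.foldl (pvStep P (pvLps P) P.length) (0, 0)).1 = pvCnt P t := by
  have h0 : ((0 : Int), (0 : Nat)) = (pvCnt P [], pvNu P []) := by
    rw [cnt_nil, nu_nil]
  rw [h0, fold_general P hP t []]
  simp

theorem trend_eq (a b : Int) :
    pvTrend a b = (if b > a then (1 : Int) else 0) - (if b < a then 1 else 0) := by
  unfold pvTrend
  split_ifs <;> omega

theorem buildT_eq (nums : List Int) : pvBuildT nums = pvBuildT_alt nums := by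
  unfold pvBuildT pvBuildT_alt
  rw [PySem.List.slice_from_one, PySem.List.pyRange_one, List.map_map]
  have hN : (((nums.length : Int) - 1) - 0).toNat = nums.length - 1 := by omega
  rw [hN]
  apply List.ext_getElem
  · simp only [List.length_map, List.length_range, List.length_zip,
      List.length_tail]
    omega
  · intro i h1 h2
    simp only [List.getElem_map, List.getElem_range, Function.comp_apply,
      List.getElem_zip]
    have hi : i < nums.length - 1 := by simpa using h1
    have hi1 : i < nums.length := by omega
    have hi2 : i + 1 < nums.length := by omega
    have hc2 : (i : Int) + 1 = (((i + 1 : Nat)) : Int) := by omega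
    rw [zero_add, hc2, PySem.List.pyGetD_natCast, PySem.List.pyGetD_natCast,
      List.getD_eq_getElem nums 0 hi1, List.getD_eq_getElem nums 0 hi2,
      List.getElem_tail]
    exact trend_eq nums[i] nums[i + 1]

theorem naive_eq_cnt (P : List Int) (hP : P ≠ []) (t : List Int) :
    ((PySem.List.pyRange 0 ((t.length : Int) - (P.length : Int) + 1) 1).map
      (fun i => if PySem.List.slice t (some i) (some (i + (P.length : Int))) = P then (1 : Int) else 0)).sum
      = pvCnt P t := by
  have hm : 1 ≤ P.length := List.length_pos_iff.mpr hP
  by_cases hL : P.length ≤ t.length + 1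
  · rw [PySem.List.pyRange_one, List.map_map]
    have hNat : (((t.length : Int) - (P.length : Int) + 1) - 0).toNat
        = t.length + 1 - P.length := by omega
    rw [hNat]
    set K := t.length + 1 - P.length with hKdef
    unfold pvCnt
    rw [show t.length = (P.length - 1) + K from by omega,
      List.range_add, List.map_append, List.sum_append]
    have h1 : ((List.range (P.length - 1)).map
        (fun i => if P <:+ t.take (i + 1) then (1 : Int) else 0)).sum = 0 := by
      apply List.sum_eq_zero
      intro x hx
      rw [List.mem_map] at hx
      obtain ⟨i, hi, rfl⟩ := hx
      rw [List.mem_range] at hi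
      exact suffix_term_zero P _ (by rw [List.length_take]; omega)
    rw [h1, zero_add, List.map_map]
    apply congrArg List.sum
    apply List.map_congr_left
    intro k hk
    rw [List.mem_range] at hk
    have hkm : k + P.length ≤ t.length := by omega
    simp only [Function.comp_apply, zero_add]
    rw [PySem.List.slice_natCast_add]
    have hidx : P.length - 1 + k + 1 = k + P.length := by omega
    rw [hidx]
    have hiff : ((t.drop k).take P.length = P) ↔ (P <:+ t.take (k + P.length)) := by
      constructor
      · intro he
        rw [List.take_add]
        exact ⟨t.take k, by rw [he]⟩
      · rintro ⟨w, hw⟩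
        have hlw : w.length = k := by
          have hl := congrArg List.length hw
          rw [List.length_append, List.length_take] at hl
          omega
        have h2 : t.take k ++ (t.drop k).take P.length = w ++ P := by
          rw [← List.take_add]
          exact hw.symm
        obtain ⟨-, h3⟩ := List.append_inj h2 (by rw [List.length_take]; omega)
        exact h3
    rw [if_congr hiff rfl rfl]
  · have hnil : PySem.List.pyRange 0 ((t.length : Int) - (P.length : Int) + 1) 1 = [] :=
      PySem.List.pyRange_one_eq_nil (by omega)
    rw [hnil]
    simp only [List.map_nil, List.sum_nil]
    unfold pvCnt
    symm
    apply List.sum_eq_zero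
    intro x hx
    rw [List.mem_map] at hx
    obtain ⟨i, hi, rfl⟩ := hx
    rw [List.mem_range] at hi
    exact suffix_term_zero P _ (by rw [List.length_take]; omega)

-- ===== VERDICT (by name: the statement is the Claim_ definition above) =====
theorem countMatchingSubarrays_kmp_spec : Claim_equal_countMatchingSubarrays_kmp := by
  intro nums pattern _ hpre
  unfold Spec_countMatchingSubarrays_kmp countMatchingSubarrays_kmp countMatchingSubarrays_kmp_alt
  simp only
  rw [fold_eq_cnt pattern hpre, buildT_eq, naive_eq_cnt pattern hpre]
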